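-- pv_equiv track=rewrite | github.com/hjkim977/Coding-Test | 프로그래머스/0/181834. l로 만들기/l로 만들기.py | solution
-- ===== SOURCE A (Python) =====
-- def solution(myString):
--     alp = 'abcdefghijk'
--     answer = ''
--     for s in myString:
--         if s in alp:
--             answer+='l'
--         else:
--             answer+=s
--     return answer
-- ===== SOURCE B (Python) =====
-- def solution(myString):
--     for c in 'abcdefghijk':
--         myString = myString.replace(c, 'l')
--     return myString
-- ===== Notes on version B (the rewrite author's own statement) =====
-- stated objective: alternative
-- what changed: Replaces A's single per-character loop-with-branch (membership test + string concatenation) by eleven staged whole-string replace passes, one per letter a-k, rebinding the string each pass.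
import Mathlib
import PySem

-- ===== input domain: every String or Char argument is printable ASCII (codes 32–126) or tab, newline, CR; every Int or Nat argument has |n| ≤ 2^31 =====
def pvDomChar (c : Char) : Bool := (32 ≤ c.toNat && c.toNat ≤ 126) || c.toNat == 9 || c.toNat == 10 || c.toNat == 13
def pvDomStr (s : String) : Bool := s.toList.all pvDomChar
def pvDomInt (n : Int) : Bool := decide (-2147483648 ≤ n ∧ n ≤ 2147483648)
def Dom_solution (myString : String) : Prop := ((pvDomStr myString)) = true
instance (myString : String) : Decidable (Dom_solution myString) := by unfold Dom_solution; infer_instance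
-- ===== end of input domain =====

-- B replaces A's single per-character loop-with-branch by eleven staged whole-string
-- replace passes, one per letter a-k (alternative decomposition, same result).

-- ===== PORT A =====
-- answer = ''; for s in myString: answer += 'l' if s in alp else s
def solution (myString : String) : String :=
  let alp := "abcdefghijk"
  String.ofList (myString.toList.foldl
    (fun answer s =>
      if PySem.Chars.isIn [s] alp.toList then answer ++ ['l'] else answer ++ [s])
    [])

-- ===== PORT B =====
-- for c in 'abcdefghijk': myString = myString.replace(c, 'l'); return myString
def solution_alt (myString : String) : String :=
  "abcdefghijk".toList.foldl
    (fun s c => PySem.Str.replace s (String.ofList [c]) "l") myString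

-- ===== PRECONDITION & SPEC =====
def Spec_solution (myString : String) (out : String) : Prop := out = solution_alt myString
instance (myString : String) (out : String) : Decidable (Spec_solution myString out) := by unfold Spec_solution; infer_instance

-- ===== CLAIM (what is proved, stated in full; the proofs are below) =====
def Claim_equal_solution : Prop := ∀ (myString : String), Dom_solution myString → Spec_solution myString (solution myString)

-- ===== LEMMAS AND PROOFS =====

-- single-character str.replace is the per-character map
lemma go_single (c d : Char) : ∀ (fuel : Nat) (l acc : List Char), l.length ≤ fuel →
    PySem.Chars.replace.go [c] [d] fuel l acc
      = acc.reverse ++ l.map (fun x => if x = c then d else x) := by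
  intro fuel
  induction fuel with
  | zero => intro l acc h; interval_cases hl : l.length <;> simp_all [PySem.Chars.replace.go, List.length_eq_zero_iff.mp hl]
  | succ n ih =>
    intro l acc h
    cases l with
    | nil => simp [PySem.Chars.replace.go]
    | cons x t =>
      simp only [PySem.Chars.replace.go]
      by_cases hx : x = c
      · subst hx
        rw [if_pos (by simp [List.isPrefixOf])]
        simp only [List.length_cons, List.drop_succ_cons, List.length_nil, List.drop_zero]
        rw [ih t _ (by simpa using h)]
        simp
      · rw [if_neg (by simp [List.isPrefixOf]; exact fun h' => hx h'.symm)]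
        rw [ih t _ (by simpa using h)]
        simp [hx]

lemma replace_single (c d : Char) (s : List Char) :
    PySem.Chars.replace s [c] [d] = s.map (fun x => if x = c then d else x) := by
  rw [PySem.Chars.replace]
  simp only [List.isEmpty_cons]
  exact go_single c d s.length s [] (le_refl _) |>.trans (by simp)

-- A's fold-with-append is the map of the per-character branch
lemma foldA (l : List Char) :
    l.foldl (fun answer s =>
        if PySem.Chars.isIn [s] "abcdefghijk".toList then answer ++ ['l'] else answer ++ [s]) []
      = l.map (fun c => if PySem.Chars.isIn [c] "abcdefghijk".toList then 'l' else c) := by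
  rw [PySem.List.foldl_congr_mem _ _
        (fun answer c => answer ++ [if PySem.Chars.isIn [c] "abcdefghijk".toList then 'l' else c]) _
        (fun acc c _ => (apply_ite (fun x => acc ++ [x]) _ _ _).symm),
      PySem.List.foldl_append_singleton_eq_map, List.nil_append]

-- B's staged passes, on char lists: a fold of single-char replaces
lemma foldB_toList (cs : List Char) (s : String) :
    (cs.foldl (fun s c => PySem.Str.replace s (String.ofList [c]) "l") s).toList
      = cs.foldl (fun l c => l.map (fun x => if x = c then 'l' else x)) s.toList := by
  induction cs generalizing s with
  | nil => rfl
  | cons c t ih =>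
    simp only [List.foldl_cons]
    rw [ih, PySem.Str.toList_replace]
    have hc : (String.ofList [c]).toList = [c] := by simp
    have hl : ("l" : String).toList = ['l'] := by decide
    rw [hc, hl, replace_single]

-- the composed per-character branches agree with A's membership branch
lemma perchar (c : Char) :
    (if PySem.Chars.isIn [c] "abcdefghijk".toList then 'l' else c)
      = "abcdefghijk".toList.foldl (fun x d => if x = d then 'l' else x) c := by
  have h : PySem.Chars.isIn [c] "abcdefghijk".toList = true ↔ c ∈ "abcdefghijk".toList := by
    rw [PySem.Chars.isIn_iff_infix, List.singleton_infix_iff]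
  by_cases hm : c ∈ "abcdefghijk".toList
  · rw [if_pos (h.mpr hm)]
    have : "abcdefghijk".toList = ['a','b','c','d','e','f','g','h','i','j','k'] := by decide
    rw [this] at hm ⊢
    simp only [List.mem_cons, List.not_mem_nil, or_false] at hm
    rcases hm with rfl|rfl|rfl|rfl|rfl|rfl|rfl|rfl|rfl|rfl|rfl <;> rfl
  · rw [if_neg (fun hh => hm (h.mp hh))]
    have : "abcdefghijk".toList = ['a','b','c','d','e','f','g','h','i','j','k'] := by decide
    rw [this] at hm ⊢
    simp only [List.mem_cons, List.not_mem_nil, or_false, not_or] at hm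
    obtain ⟨h1,h2,h3,h4,h5,h6,h7,h8,h9,h10,h11⟩ := hm
    simp [h1, h2, h3, h4, h5, h6, h7, h8, h9, h10, h11]

-- a fold of maps is the map of the pointwise fold
lemma fold_map (cs : List Char) (l : List Char) :
    cs.foldl (fun l c => l.map (fun x => if x = c then 'l' else x)) l
      = l.map (fun x => cs.foldl (fun x c => if x = c then 'l' else x) x) := by
  induction cs generalizing l with
  | nil => simp
  | cons c t ih => simp [ih, List.map_map, Function.comp_def]

-- ===== VERDICT (by name: the statement is the Claim_ definition above) =====
theorem solution_spec : Claim_equal_solution := by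
  intro myString _
  unfold Spec_solution solution solution_alt
  have hB : (("abcdefghijk".toList.foldl
      (fun s c => PySem.Str.replace s (String.ofList [c]) "l") myString)).toList
      = myString.toList.map (fun c => if PySem.Chars.isIn [c] "abcdefghijk".toList then 'l' else c) := by
    rw [foldB_toList, fold_map]
    exact List.map_congr_left (fun c _ => (perchar c).symm)
  calc String.ofList (myString.toList.foldl
        (fun answer s => if PySem.Chars.isIn [s] "abcdefghijk".toList then answer ++ ['l'] else answer ++ [s]) [])
      = String.ofList (("abcdefghijk".toList.foldl
          (fun s c => PySem.Str.replace s (String.ofList [c]) "l") myString).toList) := by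
        rw [foldA, hB]
    _ = _ := String.ofList_toList
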